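-- pv_equiv track=rewrite | github.com/davidseo98/baekjoon | Programmers/Level2/택배상자.py | solution
-- ===== SOURCE A (Python) =====
-- def solution(order):
--     answer = 0      # 정답이자 인덱스 역할 수행
--     conv = 1        # 컨베이어 벨트 (순서대로 상자가 전달되기 때문에 숫자로 설정 가능)
--     sub_conv = []   # 보조 컨베이어 벨트
--
--     while True:
--
--         if answer == len(order): break
--
--         # 만약 현재 상자가 컨베이어 벨트 혹은 보조 컨베이어 벨트에 바로 있다면
--         if order[answer] == conv:
--             answer += 1
--             conv += 1
--             continue
--         elif sub_conv and order[answer] == sub_conv[-1]: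
--             answer += 1
--             sub_conv.pop()
--             continue
--
--         # 컨베이어 벨트 나중에 필요한 상자가 있다면
--         if order[answer] > conv:
--             sub_conv.append(conv)
--             conv += 1
--
--         else:
--             if sub_conv and order[answer] == sub_conv[-1]:
--                 answer += 1
--                 sub_conv.pop()
--             else: break
--
--     return answer
-- ===== SOURCE B (Python) =====
-- def solution(order):
--     # Stack-free: a box `w` can be taken exactly when it is new, positive, and every
--     # box strictly between it and the running maximum already came off (then it is
--     # necessarily on top of the auxiliary belt).
--     seen = set()
--     hi = 0
--     answer = 0
--     for w in order:
--         if w > hi: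
--             hi = w
--         elif w >= 1 and w not in seen and all(v in seen for v in range(w + 1, hi + 1)):
--             pass
--         else:
--             break
--         seen.add(w)
--         answer += 1
--     return answer
-- ===== Notes on version B (the rewrite author's own statement) =====
-- stated objective: alternative
-- what changed: Replaces A's conveyor/auxiliary-stack simulation by a stack-free declarative check: B keeps only a set of already-taken boxes and a running maximum, and accepts a wanted box iff it is new, positive, and every box strictly between it and the running maximum was already taken (which exactly characterizes being the top of A's auxiliary belt).
import Mathlib
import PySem

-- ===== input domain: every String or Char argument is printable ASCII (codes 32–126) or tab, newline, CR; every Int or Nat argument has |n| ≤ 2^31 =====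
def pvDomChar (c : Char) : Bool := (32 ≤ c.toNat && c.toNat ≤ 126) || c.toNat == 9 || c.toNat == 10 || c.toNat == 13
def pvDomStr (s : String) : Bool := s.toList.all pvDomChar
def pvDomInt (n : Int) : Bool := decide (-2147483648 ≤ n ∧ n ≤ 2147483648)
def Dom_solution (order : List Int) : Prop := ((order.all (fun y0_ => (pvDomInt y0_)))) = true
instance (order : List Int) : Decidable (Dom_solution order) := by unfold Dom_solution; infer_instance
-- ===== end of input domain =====

-- B drops A's conveyor/auxiliary-stack simulation entirely: it keeps only a set of
-- already-taken boxes and a running maximum, accepting a wanted box iff it is new,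
-- positive, and every box strictly between it and the running maximum was already
-- taken (objective: alternative).

-- ===== PORT A =====
-- A's `while True` loop; `answer` doubles as index, `sub` is sub_conv with its top at the head.
-- The `order.length ≤ answer` guard is Python's `answer == len(order)` (answer never exceeds
-- the length in reachable states; ≤ only makes the recursion total on all arguments).
def solnLoop (order : List Int) (answer : Nat) (conv : Int) (sub : List Int) : Int :=
  if order.length ≤ answer then (answer : Int)
  else
    let w := order.getD answer 0
    if w = conv then solnLoop order (answer + 1) (conv + 1) sub
    else if sub ≠ [] ∧ w = sub.headD 0 then solnLoop order (answer + 1) conv sub.tail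
    else if conv < w then solnLoop order answer (conv + 1) (conv :: sub)
    else if sub ≠ [] ∧ w = sub.headD 0 then solnLoop order (answer + 1) conv sub.tail
    else (answer : Int)
termination_by (order.length - answer, (order.getD answer 0 - conv).toNat)
decreasing_by
  all_goals first
    | exact Prod.Lex.left _ _ (by omega)
    | exact Prod.Lex.right _ (by omega)

def solution (order : List Int) : Int := solnLoop order 0 1 []

-- ===== PORT B =====
-- `for w in order`: take w iff `w > hi` (fresh maximum) or `w >= 1 and w not in seen
-- and all(v in seen for v in range(w+1, hi+1))`; else break.
def altGo (rest : List Int) (seen : PySem.Set Int) (hi ans : Int) : Int :=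
  match rest with
  | [] => ans
  | w :: rs =>
    if hi < w then altGo rs (PySem.Set.add seen w) w (ans + 1)
    else if 1 ≤ w ∧ PySem.Set.contains seen w = false ∧
        ((PySem.List.pyRange (w + 1) (hi + 1) 1).all (fun v => PySem.Set.contains seen v)) = true then
      altGo rs (PySem.Set.add seen w) hi (ans + 1)
    else ans

def solution_alt (order : List Int) : Int := altGo order PySem.Set.empty 0 0

-- ===== PRECONDITION & SPEC =====
def Spec_solution (order : List Int) (out : Int) : Prop := out = solution_alt order
instance (order : List Int) (out : Int) : Decidable (Spec_solution order out) := by unfold Spec_solution; infer_instance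

-- ===== CLAIM (what is proved, stated in full; the proofs are below) =====
def Claim_equal_solution : Prop := ∀ (order : List Int), Dom_solution order → Spec_solution order (solution order)

-- ===== LEMMAS AND PROOFS =====

-- the boxes A pushes while advancing the conveyor from `conv` up to `w`, top first
def pushed (conv w : Int) : List Int := (PySem.List.pyRange conv w 1).reverse

theorem mem_pushed {v conv w : Int} : v ∈ pushed conv w ↔ conv ≤ v ∧ v < w := by
  simp [pushed, PySem.List.mem_pyRange_one]

theorem pairwise_pushed (conv w : Int) : (pushed conv w).Pairwise (· > ·) := by
  rw [pushed, List.pairwise_reverse]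
  exact PySem.List.pairwise_lt_pyRange_one conv w

theorem pushed_snoc {conv w : Int} (h : conv < w) :
    pushed (conv + 1) w ++ [conv] = pushed conv w := by
  rw [pushed, pushed, PySem.List.pyRange_one_cons h, List.reverse_cons]

theorem pushed_self (w : Int) : pushed w w = [] := by
  rw [pushed, PySem.List.pyRange_one_eq_nil le_rfl, List.reverse_nil]

-- the coupling between A's state (conv, sub) and B's state (seen, hi)
def StInv (conv : Int) (sub : List Int) (seen : List Int) (hi : Int) : Prop :=
  conv = hi + 1 ∧ 0 ≤ hi ∧ sub.Pairwise (· > ·) ∧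
  (∀ v, v ∈ sub ↔ 1 ≤ v ∧ v ≤ hi ∧ v ∉ seen) ∧ (∀ v ∈ seen, v ≤ hi)

-- A's multi-step push phase collapses into one combined step
theorem pushPhase (order : List Int) (w : Int) : ∀ (d : Nat) (answer : Nat) (conv : Int)
    (sub : List Int), answer < order.length → order.getD answer 0 = w → conv ≤ w →
    (w - conv).toNat = d → (∀ x ∈ sub, x < conv) →
    solnLoop order answer conv sub = solnLoop order (answer + 1) (w + 1) (pushed conv w ++ sub) := by
  intro d
  induction d with
  | zero =>
    intro answer conv sub hlt hw hle hd _
    have hcw : conv = w := by omega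
    subst hcw
    rw [solnLoop, if_neg (by omega), pushed_self, List.nil_append]
    rw [List.getD_eq_getElem?_getD] at hw
    simp [hw]
  | succ d ih =>
    intro answer conv sub hlt hw hle hd hsub
    have hcw : conv < w := by omega
    have hpop : ¬ (sub ≠ [] ∧ w = sub.headD 0) := by
      rintro ⟨hne, hhd⟩
      cases sub with
      | nil => exact hne rfl
      | cons t s =>
        have := hsub t List.mem_cons_self
        simp at hhd
        omega
    rw [solnLoop, if_neg (by omega)]
    simp only [hw, if_neg (by omega : ¬ w = conv), if_neg hpop, if_pos hcw]
    have hsub' : ∀ x ∈ conv :: sub, x < conv + 1 := by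
      intro x hx
      rcases List.mem_cons.mp hx with h | h
      · omega
      · have := hsub x h
        omega
    rw [ih answer (conv + 1) (conv :: sub) hlt hw (by omega) (by omega) hsub']
    rw [show pushed (conv + 1) w ++ conv :: sub = (pushed (conv + 1) w ++ [conv]) ++ sub by simp,
      pushed_snoc hcw]

-- A's pop condition coincides with B's declarative acceptance test
theorem cond_iff {conv hi w : Int} {sub seen : List Int}
    (hInv : StInv conv sub seen hi) (hle : w ≤ hi) :
    (sub ≠ [] ∧ w = sub.headD 0) ↔
      (1 ≤ w ∧ w ∉ seen ∧ ∀ v, w < v → v ≤ hi → v ∈ seen) := by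
  obtain ⟨hconv, hhi, hpw, hmem, hbnd⟩ := hInv
  constructor
  · rintro ⟨hne, hhd⟩
    cases sub with
    | nil => exact absurd rfl hne
    | cons t s =>
      simp only [List.headD_cons] at hhd
      subst hhd
      have hw := (hmem w).mp List.mem_cons_self
      refine ⟨hw.1, hw.2.2, fun v hv1 hv2 => ?_⟩
      by_contra hvs
      have hvsub : v ∈ w :: s := (hmem v).mpr ⟨by omega, hv2, hvs⟩
      rcases List.mem_cons.mp hvsub with h | h
      · omega
      · have := (List.pairwise_cons.mp hpw).1 v h
        omega
  · rintro ⟨h1, h2, h3⟩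
    have hwsub : w ∈ sub := (hmem w).mpr ⟨h1, hle, h2⟩
    cases sub with
    | nil => simp at hwsub
    | cons t s =>
      refine ⟨by simp, ?_⟩
      rcases List.mem_cons.mp hwsub with h | h
      · simp [h]
      · -- w strictly below the top t would leave t an untaken box above w
        have htw : t > w := (List.pairwise_cons.mp hpw).1 w h
        have ht := (hmem t).mp List.mem_cons_self
        have := h3 t htw ht.2.1
        exact absurd this ht.2.2

-- B's acceptance test, as the Booleans the port evaluates
theorem bcond_eq {w hi : Int} {seen : PySem.Set Int} :
    (1 ≤ w ∧ PySem.Set.contains seen w = false ∧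
      ((PySem.List.pyRange (w + 1) (hi + 1) 1).all (fun v => PySem.Set.contains seen v)) = true) ↔
      (1 ≤ w ∧ w ∉ seen ∧ ∀ v, w < v → v ≤ hi → v ∈ seen) := by
  have hc : ∀ v : Int, PySem.Set.contains seen v = true ↔ v ∈ seen :=
    fun v => PySem.Set.contains_iff seen v
  constructor
  · rintro ⟨h1, h2, h3⟩
    refine ⟨h1, ?_, ?_⟩
    · intro hmem
      rw [(hc w).mpr hmem] at h2
      exact Bool.noConfusion h2
    · intro v hv1 hv2
      exact (hc v).mp
        (List.all_eq_true.mp h3 v (PySem.List.mem_pyRange_one.mpr ⟨by omega, by omega⟩))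
  · rintro ⟨h1, h2, h3⟩
    refine ⟨h1, ?_, ?_⟩
    · cases h : PySem.Set.contains seen w with
      | false => rfl
      | true => exact absurd ((hc w).mp h) h2
    · refine List.all_eq_true.mpr fun v hv => ?_
      have hm := PySem.List.mem_pyRange_one.mp hv
      exact (hc v).mpr (h3 v (by omega) (by omega))

theorem main_eq (order : List Int) : ∀ (rest : List Int) (answer : Nat) (conv : Int)
    (sub seen : List Int) (hi : Int), rest = order.drop answer → StInv conv sub seen hi →
    solnLoop order answer conv sub = altGo rest seen hi (answer : Int) := by
  intro rest
  induction rest with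
  | nil =>
    intro answer conv sub seen hi hdrop _
    have : order.length ≤ answer := List.drop_eq_nil_iff.mp hdrop.symm
    rw [solnLoop, if_pos this, altGo]
  | cons w rs ih =>
    intro answer conv sub seen hi hdrop hInv
    have hlt : answer < order.length := by
      by_contra h
      rw [List.drop_eq_nil_iff.mpr (by omega)] at hdrop
      exact List.cons_ne_nil w rs hdrop
    have hw : order.getD answer 0 = w := by
      have h1 : (order.drop answer).head? = some w := by rw [← hdrop]; rfl
      rw [List.head?_drop] at h1
      rw [List.getD_eq_getElem?_getD, h1]
      rfl
    have hrs : rs = order.drop (answer + 1) := by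
      have : (order.drop answer).tail = rs := by rw [← hdrop]; rfl
      rw [List.tail_drop] at this
      exact this.symm
    obtain ⟨hconv, hhi, hpw, hmem, hbnd⟩ := hInv
    by_cases hbig : hi < w
    · -- fresh maximum: A's push phase + pop, B's `w > hi` branch
      rw [pushPhase order w (w - conv).toNat answer conv sub hlt hw (by omega) rfl
        (fun x hx => by have := ((hmem x).mp hx).2.1; omega)]
      rw [ih (answer + 1) (w + 1) (pushed conv w ++ sub) (PySem.Set.add seen w) w hrs ?_]
      · rw [altGo, if_pos hbig]
        push_cast
        ring_nf
      · refine ⟨rfl, by omega, ?_, ?_, ?_⟩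
        · rw [List.pairwise_append]
          exact ⟨pairwise_pushed conv w, hpw, fun x hx y hy => by
            have hx' := mem_pushed.mp hx
            have hy' := ((hmem y).mp hy).2.1
            omega⟩
        · intro v
          rw [List.mem_append, mem_pushed, hmem, PySem.Set.mem_add]
          constructor
          · rintro (⟨h1, h2⟩ | ⟨h1, h2, h3⟩)
            · exact ⟨by omega, by omega, fun h => by
                rcases h with h | h
                · have := hbnd v h; omega
                · omega⟩
            · exact ⟨h1, by omega, fun h => by
                rcases h with h | h
                · exact h3 h
                · omega⟩
          · rintro ⟨h1, h2, h3⟩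
            by_cases hv : v ≤ hi
            · exact Or.inr ⟨h1, hv, fun h => h3 (Or.inl h)⟩
            · exact Or.inl ⟨by omega, by
                rcases lt_or_eq_of_le h2 with h | h
                · exact h
                · exact absurd (Or.inr h) h3⟩
        · intro v hv
          rcases (PySem.Set.mem_add _ _ _).mp hv with h | h
          · have := hbnd v h; omega
          · omega
    · -- w ≤ hi: either both pop / accept, or both break
      have hlew : w ≤ hi := by omega
      by_cases hpop : sub ≠ [] ∧ w = sub.headD 0
      · obtain ⟨t, s, rfl⟩ : ∃ t s, sub = t :: s := by
          cases sub with
          | nil => exact absurd rfl hpop.1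
          | cons t s => exact ⟨t, s, rfl⟩
        have hwt : w = t := by simpa using hpop.2
        rw [solnLoop, if_neg (by omega)]
        simp only [hw, if_neg (by omega : ¬ w = conv), if_pos hpop, List.tail_cons]
        have hcond := (cond_iff ⟨hconv, hhi, hpw, hmem, hbnd⟩ hlew).mp hpop
        rw [ih (answer + 1) conv s (PySem.Set.add seen w) hi hrs ?_]
        · rw [altGo, if_neg hbig, if_pos (bcond_eq.mpr hcond)]
          push_cast
          ring_nf
        · refine ⟨hconv, hhi, (List.pairwise_cons.mp hpw).2, ?_, ?_⟩
          · intro v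
            rw [PySem.Set.mem_add]
            constructor
            · intro hv
              have h1 := (hmem v).mp (List.mem_cons_of_mem t hv)
              have h2 := (List.pairwise_cons.mp hpw).1 v hv
              exact ⟨h1.1, h1.2.1, fun h => by
                rcases h with h | h
                · exact h1.2.2 h
                · omega⟩
            · rintro ⟨h1, h2, h3⟩
              have : v ∈ t :: s := (hmem v).mpr ⟨h1, h2, fun h => h3 (Or.inl h)⟩
              rcases List.mem_cons.mp this with h | h
              · exact absurd (Or.inr (by omega)) h3
              · exact h
          · intro v hv
            rcases (PySem.Set.mem_add _ _ _).mp hv with h | h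
            · exact hbnd v h
            · omega
      · -- both break, returning the count so far
        rw [solnLoop, if_neg (by omega)]
        simp only [hw, if_neg (by omega : ¬ w = conv), if_neg hpop,
          if_neg (by omega : ¬ conv < w)]
        have hcond := (cond_iff ⟨hconv, hhi, hpw, hmem, hbnd⟩ hlew).not.mp hpop
        rw [altGo, if_neg hbig, if_neg (fun h => hcond (bcond_eq.mp h))]

-- ===== VERDICT (by name: the statement is the Claim_ definition above) =====
theorem solution_spec : Claim_equal_solution := by
  intro order _
  unfold Spec_solution solution solution_alt
  have hInv : StInv 1 [] [] 0 := by
    refine ⟨rfl, le_rfl, List.Pairwise.nil, fun v => ?_, fun v hv => by simp at hv⟩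
    simp
    omega
  simpa using main_eq order order 0 1 [] [] 0 (by simp) hInv
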